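-- pv_equiv track=rewrite | github.com/xiaoZ857/Verilog-benchmark | results_analyzer.py | extract_test_pattern
-- ===== SOURCE A (Python) =====
-- def extract_test_pattern(log_content: str) -> str:
--     """从测试日志中提取失败模式"""
--     # 查找与tb_match相关的关键信息
--     tb_match_lines = [line for line in log_content.split('\n') if 'tb_match' in line]
--     if tb_match_lines:
--         return tb_match_lines[-1].strip()
--
--     # 查找包含关键信号信息的行
--     signal_lines = []
--     for line in log_content.split('\n'):
--         if any(keyword in line.lower() for keyword in ['mismatch', 'error', 'failed', 'assert']):
--             signal_lines.append(line.strip())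
--
--     return signal_lines[-1] if signal_lines else "Unknown pattern"
-- ===== SOURCE B (Python) =====
-- def extract_test_pattern(log_content: str) -> str:
--     """Single pass: maintain the latest tb_match line and latest keyword line."""
--     last_tb = None
--     last_signal = None
--     for line in log_content.split('\n'):
--         if 'tb_match' in line:
--             last_tb = line.strip()
--         if any(k in line.lower() for k in ['mismatch', 'error', 'failed', 'assert']):
--             last_signal = line.strip()
--     if last_tb is not None:
--         return last_tb
--     if last_signal is not None:
--         return last_signal
--     return "Unknown pattern"
-- ===== Notes on version B (the rewrite author's own statement) =====
-- stated objective: alternative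
-- what changed: Replaced A's two full scans (a tb_match comprehension plus a separate keyword-collecting loop, each re-splitting the log) by a single pass over the lines that maintains two running candidates (last tb_match line, last keyword line), preferring the tb_match candidate, then the keyword one, then the fallback.
import Mathlib
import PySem

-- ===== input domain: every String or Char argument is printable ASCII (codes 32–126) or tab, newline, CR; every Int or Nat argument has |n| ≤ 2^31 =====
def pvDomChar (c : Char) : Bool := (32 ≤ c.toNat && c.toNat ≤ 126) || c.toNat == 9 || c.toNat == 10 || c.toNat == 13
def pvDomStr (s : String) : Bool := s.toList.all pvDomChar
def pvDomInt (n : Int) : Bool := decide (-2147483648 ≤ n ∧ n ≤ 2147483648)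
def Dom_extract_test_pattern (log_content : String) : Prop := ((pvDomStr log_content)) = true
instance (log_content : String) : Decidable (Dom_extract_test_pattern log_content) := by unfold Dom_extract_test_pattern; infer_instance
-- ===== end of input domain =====

-- B merges A's two sequential scans into one pass keeping two running candidates (alternative decomposition, same cost class).

-- shared predicates: 'tb_match' in line, and any failure keyword in line.lower()
def pvTbP (line : String) : Bool := PySem.Str.isIn "tb_match" line
def pvKwP (line : String) : Bool :=
  ["mismatch", "error", "failed", "assert"].any (fun k => PySem.Str.isIn k (PySem.Str.lower line))

-- ===== PORT A =====
def extract_test_pattern (log_content : String) : String :=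
  let tb_match_lines := ((PySem.Str.split? log_content "\n").getD []).filter pvTbP
  if h : tb_match_lines ≠ [] then
    PySem.Str.strip (tb_match_lines.getLast h)
  else
    let signal_lines := ((PySem.Str.split? log_content "\n").getD []).foldl
      (fun acc line => if pvKwP line then acc ++ [PySem.Str.strip line] else acc) []
    if h2 : signal_lines ≠ [] then signal_lines.getLast h2 else "Unknown pattern"

-- ===== PORT B =====
def extract_test_pattern_alt (log_content : String) : String :=
  let res := ((PySem.Str.split? log_content "\n").getD []).foldl
    (fun (acc : Option String × Option String) line =>
      ((if pvTbP line then some (PySem.Str.strip line) else acc.1),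
       (if pvKwP line then some (PySem.Str.strip line) else acc.2)))
    (none, none)
  match res.1 with
  | some v => v
  | none =>
    match res.2 with
    | some v => v
    | none => "Unknown pattern"

-- ===== PRECONDITION & SPEC =====
def Spec_extract_test_pattern (log_content : String) (out : String) : Prop := out = extract_test_pattern_alt log_content
instance (log_content : String) (out : String) : Decidable (Spec_extract_test_pattern log_content out) := by unfold Spec_extract_test_pattern; infer_instance

-- ===== CLAIM (what is proved, stated in full; the proofs are below) =====
def Claim_equal_extract_test_pattern : Prop := ∀ (log_content : String), Dom_extract_test_pattern log_content → Spec_extract_test_pattern log_content (extract_test_pattern log_content)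

-- ===== LEMMAS AND PROOFS =====

-- B's pair-fold splits into two independent option-folds
theorem pvFoldPair (ls : List String) (t s : Option String) :
    ls.foldl
      (fun (acc : Option String × Option String) line =>
        ((if pvTbP line then some (PySem.Str.strip line) else acc.1),
         (if pvKwP line then some (PySem.Str.strip line) else acc.2))) (t, s)
    = (ls.foldl (fun o line => if pvTbP line then some (PySem.Str.strip line) else o) t,
       ls.foldl (fun o line => if pvKwP line then some (PySem.Str.strip line) else o) s) := by
  induction ls generalizing t s with
  | nil => rfl
  | cons a rest ih => simp [List.foldl_cons, ih]

-- an option-fold that overwrites on p is 'stripped last p-line, else the start value'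
theorem pvFoldOpt (p : String → Bool) (ls : List String) (o : Option String) :
    ls.foldl (fun o line => if p line then some (PySem.Str.strip line) else o) o
    = (match (ls.filter p).getLast? with
       | some l => some (PySem.Str.strip l)
       | none => o) := by
  induction ls generalizing o with
  | nil => rfl
  | cons a rest ih =>
    rw [List.foldl_cons, ih]
    by_cases h : p a
    · cases hr : (rest.filter p).getLast? with
      | some l =>
        have hne : rest.filter p ≠ [] := by
          intro he; rw [he] at hr; simp at hr
        obtain ⟨c, cs, hcc⟩ := List.exists_cons_of_ne_nil hne
        simp only [List.filter_cons, h, if_true]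
        rw [hcc, List.getLast?_cons_cons, ← hcc, hr]
      | none =>
        have he : rest.filter p = [] := List.getLast?_eq_none_iff.mp hr
        simp [h, he]
    · simp [h]

theorem extract_test_pattern_eq (log_content : String) :
    extract_test_pattern log_content = extract_test_pattern_alt log_content := by
  unfold extract_test_pattern extract_test_pattern_alt
  rw [pvFoldPair, pvFoldOpt, pvFoldOpt, PySem.List.foldl_append_if]
  simp only [List.nil_append]
  by_cases h : ((PySem.Str.split? log_content "\n").getD []).filter pvTbP = []
  · simp only [h, List.getLast?_nil]
    cases hk : (((PySem.Str.split? log_content "\n").getD []).filter pvKwP).getLast? with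
    | some l =>
      have hkne : (((PySem.Str.split? log_content "\n").getD []).filter pvKwP).map PySem.Str.strip ≠ [] := by
        simp only [ne_eq, List.map_eq_nil_iff]
        intro he; rw [he] at hk; simp at hk
      simp only [ne_eq, not_true_eq_false, dite_false, hkne, not_false_eq_true, dite_true]
      rw [List.getLast_eq_iff_getLast?_eq_some]
      rw [List.getLast?_map, hk]; rfl
    | none =>
      have hke : ((PySem.Str.split? log_content "\n").getD []).filter pvKwP = [] :=
        List.getLast?_eq_none_iff.mp hk
      simp [hke]
  · have hl : (((PySem.Str.split? log_content "\n").getD []).filter pvTbP).getLast?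
        = some ((((PySem.Str.split? log_content "\n").getD []).filter pvTbP).getLast h) :=
      List.getLast?_eq_some_getLast h
    simp only [h, ne_eq, not_false_eq_true, dite_true, hl]

-- ===== VERDICT (by name: the statement is the Claim_ definition above) =====
theorem extract_test_pattern_spec : Claim_equal_extract_test_pattern := by
  intro log_content _
  unfold Spec_extract_test_pattern
  exact extract_test_pattern_eq log_content
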